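-- pv_equiv track=rewrite | github.com/allinne/advent2023 | 03b.py | chonit
-- ===== SOURCE A (Python) =====
-- digits ='1234567890'
--
-- def chonit(x, y, lines):
--     '''
--     >>> chonit(2, 0, small)
--     467
--
--     >>> chonit(1, 0, small)
--     467
--
--     >>> chonit(0, 0, small)
--     467
--
--
--     >>> chonit(2, 6, small)
--     592
--
--     >>> chonit(3, 6, small)
--     592
--
--     >>> chonit(4, 6, small)
--     592
--
--
--     >>> chonit(1, 9, small)
--     664
--
--     >>> chonit(2, 9, small)
--     664
--
--     >>> chonit(3, 9, small)
--     664
--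
--
--     >>> chonit(7, 5, small)
--     58
--
--     >>> chonit(8, 5, small)
--     58
--
--
--     >>> chonit(140, 65, lines)
--     296
--
--     >>> chonit(139, 65, lines)
--     296
--
--     >>> chonit(138, 65, lines)
--     296
--     '''
--
--     x1 = x - 1
--     s = ''
--     while x1 > -1 and digits.find(lines[y][x1]) > -1:
--         s += lines[y][x1]
--         x1 -= 1
--     both = s[::-1]
--
--     x1 = x
--     s = ''
--     while x1 < len(lines[0]) and digits.find(lines[y][x1]) > -1:
--         s += lines[y][x1]
--         x1 += 1
--     both += s
--
--     return int(both)
-- ===== SOURCE B (Python) =====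
-- def chonit(x, y, lines):
--     # The number at (x, y): digits immediately left of x, plus digits from x
--     # onward within the grid width.  Slices + strips instead of char loops.
--     width = len(lines[0])
--     row = lines[y]
--     start = len(row[:x].rstrip('0123456789'))
--     right = row[x:width]
--     stop = x + len(right) - len(right.lstrip('0123456789'))
--     return int(row[start:stop])
-- ===== Notes on version B (the rewrite author's own statement) =====
-- stated objective: idiomatic
-- what changed: B replaces A's two character-by-character while-loops (manual index bookkeeping, string building, a reversal) with loop-free slicing: the number's bounds are read off as the length of row[:x].rstrip(digits) and the leading digit run of row[x:width], and one slice is converted with int(); Pre_ excludes x<0, where A reads the row with Python's negative-index wraparound and pastes an accidental number from the row's tail and head.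
-- outside the precondition, e.g. on chonit(-1, 0, ['12']): A returns 212, B raises ValueError; on chonit(-3, 0, ['12a4']): A returns 2, B returns 12
import Mathlib
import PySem

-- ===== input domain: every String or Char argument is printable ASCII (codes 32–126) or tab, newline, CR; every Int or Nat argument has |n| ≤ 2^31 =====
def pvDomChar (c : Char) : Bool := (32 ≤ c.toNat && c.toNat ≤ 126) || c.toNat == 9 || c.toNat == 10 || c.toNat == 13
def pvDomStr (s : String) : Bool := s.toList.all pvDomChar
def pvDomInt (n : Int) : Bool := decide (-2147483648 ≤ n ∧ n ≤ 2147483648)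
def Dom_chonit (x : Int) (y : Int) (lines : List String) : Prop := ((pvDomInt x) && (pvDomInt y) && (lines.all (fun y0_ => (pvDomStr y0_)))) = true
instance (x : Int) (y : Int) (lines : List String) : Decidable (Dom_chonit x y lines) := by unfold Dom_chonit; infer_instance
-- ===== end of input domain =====

-- B reads the number at (x,y) with slices and strips — the trailing digit run of row[:x]
-- and the leading digit run of row[x:width] — instead of A's two char-by-char while loops.

-- ===== PORT A =====
-- digits = '1234567890'
def pvDigitsA : String := "1234567890"
-- digits.find(c) > -1  (c a one-character string)
def pvDigA (c : Char) : Bool := PySem.Str.find pvDigitsA (String.ofList [c]) > -1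

-- first while loop: x1 runs x-1, x-2, …; encoded by k = x1 + 1 (guard 'x1 > -1' ↔ k > 0);
-- out-of-range access (impossible under Pre_) yields the non-digit '.'
def pvGoLeft (r : List Char) : Nat → List Char → List Char
  | 0, s => s
  | k+1, s =>
    let c := (PySem.List.pyGet? r ((k : Nat) : Int)).getD '.'
    if pvDigA c then pvGoLeft r k (s ++ [c]) else s

-- second while loop: fuel = w - x1 (guard 'x1 < w' ↔ fuel > 0)
def pvGoRight (r : List Char) : Nat → Int → List Char → List Char
  | 0, _, s => s
  | f+1, x1, s =>
    let c := (PySem.List.pyGet? r x1).getD '.'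
    if pvDigA c then pvGoRight r f (x1 + 1) (s ++ [c]) else s

def chonit (x : Int) (y : Int) (lines : List String) : Int :=
  let r := ((PySem.List.pyGet? lines y).getD "").toList
  let both1 := (pvGoLeft r x.toNat []).reverse                        -- both = s[::-1]
  let w := ((PySem.List.pyGet? lines 0).getD "").toList.length        -- len(lines[0])
  let both := both1 ++ pvGoRight r ((w : Int) - x).toNat x []          -- both += s
  (PySem.Int.ofStr? (String.ofList both)).getD 0                           -- int(both); ValueError outside Pre_

-- ===== PORT B =====
-- the membership test of rstrip/lstrip's chars argument: c in '0123456789'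
def pvDigB (c : Char) : Bool := ("0123456789".toList).contains c
-- s.rstrip('0123456789') / s.lstrip('0123456789'): exact — strip with a chars argument
-- removes the characters of the set from the end / the start (ported by hand)
def pvRstripDig (l : List Char) : List Char := (l.reverse.dropWhile pvDigB).reverse
def pvLstripDig (l : List Char) : List Char := l.dropWhile pvDigB

def chonit_alt (x : Int) (y : Int) (lines : List String) : Int :=
  let width := ((PySem.List.pyGet? lines 0).getD "").toList.length                 -- len(lines[0])
  let row := ((PySem.List.pyGet? lines y).getD "").toList                          -- lines[y]
  let start := (pvRstripDig (PySem.List.slice row none (some x))).length           -- len(row[:x].rstrip(...))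
  let right := PySem.List.slice row (some x) (some (width : Int))                  -- row[x:width]
  let stop := x + (right.length : Int) - ((pvLstripDig right).length : Int)
  (PySem.Int.ofStr? (String.ofList (PySem.List.slice row (some (start : Int)) (some stop)))).getD 0
    -- int(row[start:stop]); ValueError outside Pre_

-- ===== PRECONDITION & SPEC =====
-- Pre_ = the inputs on which A returns normally, minus x < 0, where A reads the row with
-- Python's NEGATIVE-INDEX wraparound and pastes together a number from the row's tail and
-- head — an accidental value (B's slices read the row left to right and give another value
-- there, or raise ValueError).
def Pre_chonit (x : Int) (y : Int) (lines : List String) : Prop :=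
  PySem.Raise.InRange lines.length y ∧ 0 ≤ x ∧
  x ≤ ((((PySem.List.pyGet? lines y).getD "").toList).length : Int) ∧
  ¬ (((((PySem.List.pyGet? lines y).getD "").toList).length <
        (((PySem.List.pyGet? lines 0).getD "").toList).length) ∧
      (((((PySem.List.pyGet? lines y).getD "").toList).drop x.toNat).all pvDigA)) ∧
  ((1 ≤ x ∧ pvDigA ((((PySem.List.pyGet? lines y).getD "").toList).getD (x.toNat - 1) '.')) ∨
    (x < ((((PySem.List.pyGet? lines 0).getD "").toList).length : Int) ∧
      x < ((((PySem.List.pyGet? lines y).getD "").toList).length : Int) ∧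
      pvDigA ((((PySem.List.pyGet? lines y).getD "").toList).getD x.toNat '.')))
instance (x : Int) (y : Int) (lines : List String) : Decidable (Pre_chonit x y lines) := by
  unfold Pre_chonit; infer_instance

def pvWitness_chonit : Int × Int × List String := (2, 0, ["467.."])

def Spec_chonit (x : Int) (y : Int) (lines : List String) (out : Int) : Prop := out = chonit_alt x y lines
instance (x : Int) (y : Int) (lines : List String) (out : Int) : Decidable (Spec_chonit x y lines out) := by unfold Spec_chonit; infer_instance

-- ===== CLAIM (what is proved, stated in full; the proofs are below) =====
def Claim_equal_chonit : Prop := ∀ (x : Int) (y : Int) (lines : List String), Dom_chonit x y lines → Pre_chonit x y lines → Spec_chonit x y lines (chonit x y lines)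

-- ===== LEMMAS AND PROOFS =====

-- A's digit test (digits.find(c) > -1) agrees with isdigit on every character
lemma pvDigA_eq_isdigit : pvDigA = PySem.Chars.isdigit := by
  funext c
  simp only [pvDigA, pvDigitsA, PySem.Str.find_eq]
  simp [PySem.Chars.find, PySem.Chars.find.go, List.isPrefixOf, beq_iff_eq, PySem.Chars.isdigit]
  split_ifs with h1 h2 h3 h4 h5 h6 h7 h8 h9 h10
  · subst h1; decide
  · subst h2; decide
  · subst h3; decide
  · subst h4; decide
  · subst h5; decide
  · subst h6; decide
  · subst h7; decide
  · subst h8; decide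
  · subst h9; decide
  · subst h10; decide
  · have hnd : ¬('0' ≤ c ∧ c ≤ '9') := by
      rintro ⟨ha, hb⟩
      rw [Char.le_def] at ha hb
      have ha' : 48 ≤ c.val.toNat := ha
      have hb' : c.val.toNat ≤ 57 := hb
      simp only [Char.ext_iff, UInt32.ext_iff] at h1 h2 h3 h4 h5 h6 h7 h8 h9 h10
      simp at h1 h2 h3 h4 h5 h6 h7 h8 h9 h10
      have hcv : c.toNat = c.val.toNat := rfl
      omega
    rcases Decidable.not_and_iff_not_or_not.mp hnd with h | h <;> simp [h]

-- B's digit test (c in '0123456789') agrees with isdigit on every character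
lemma pvDigB_eq_isdigit : pvDigB = PySem.Chars.isdigit := by
  funext c
  simp [pvDigB, PySem.Chars.isdigit]
  rw [Bool.eq_iff_iff]
  simp only [Bool.or_eq_true, decide_eq_true_eq, Bool.and_eq_true]
  constructor
  · rintro (h | h | h | h | h | h | h | h | h | h) <;> subst h <;> exact ⟨by decide, by decide⟩
  · rintro ⟨ha, hb⟩
    rw [Char.le_def] at ha hb
    have ha' : 48 ≤ c.val.toNat := ha
    have hb' : c.val.toNat ≤ 57 := hb
    have hch : ∀ (d : Char), c.val.toNat = d.val.toNat → c = d := by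
      intro d h
      exact Char.ext (UInt32.toNat_inj.mp h)
    have hd : c.val.toNat = 48 ∨ c.val.toNat = 49 ∨ c.val.toNat = 50 ∨ c.val.toNat = 51 ∨
        c.val.toNat = 52 ∨ c.val.toNat = 53 ∨ c.val.toNat = 54 ∨ c.val.toNat = 55 ∨
        c.val.toNat = 56 ∨ c.val.toNat = 57 := by omega
    rcases hd with h | h | h | h | h | h | h | h | h | h
    · exact Or.inl (hch '0' h)
    · exact Or.inr (Or.inl (hch '1' h))
    · exact Or.inr (Or.inr (Or.inl (hch '2' h)))
    · exact Or.inr (Or.inr (Or.inr (Or.inl (hch '3' h))))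
    · exact Or.inr (Or.inr (Or.inr (Or.inr (Or.inl (hch '4' h)))))
    · exact Or.inr (Or.inr (Or.inr (Or.inr (Or.inr (Or.inl (hch '5' h))))))
    · exact Or.inr (Or.inr (Or.inr (Or.inr (Or.inr (Or.inr (Or.inl (hch '6' h)))))))
    · exact Or.inr (Or.inr (Or.inr (Or.inr (Or.inr (Or.inr (Or.inr (Or.inl (hch '7' h))))))))
    · exact Or.inr (Or.inr (Or.inr (Or.inr (Or.inr (Or.inr (Or.inr (Or.inr (Or.inl (hch '8' h)))))))))
    · exact Or.inr (Or.inr (Or.inr (Or.inr (Or.inr (Or.inr (Or.inr (Or.inr (Or.inr (hch '9' h)))))))))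

lemma pvGoLeft_acc (r : List Char) : ∀ (k : Nat) (s : List Char),
    pvGoLeft r k s = s ++ pvGoLeft r k [] := by
  intro k
  induction k with
  | zero => intro s; simp [pvGoLeft]
  | succ k ih =>
    intro s
    simp only [pvGoLeft]
    split
    · rw [ih (s ++ _), ih ([] ++ _)]; simp
    · simp

lemma pvGoLeft_eq (r : List Char) : ∀ (k : Nat), k ≤ r.length →
    pvGoLeft r k [] = ((r.take k).reverse).takeWhile pvDigA := by
  intro k
  induction k with
  | zero => intro _; simp [pvGoLeft]
  | succ k ih =>
    intro hk
    have hklt : k < r.length := hk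
    have htake : r.take (k+1) = r.take k ++ [r[k]] := by
      rw [List.take_succ]
      simp [List.getElem?_eq_getElem hklt]
    have hget : (PySem.List.pyGet? r ((k : Nat) : Int)).getD '.' = r[k] := by
      simp [PySem.List.pyGet?_natCast, List.getElem?_eq_getElem hklt]
    simp only [pvGoLeft, hget, htake, List.reverse_append, List.reverse_cons, List.reverse_nil,
      List.nil_append, List.cons_append, List.takeWhile_cons]
    split
    · rw [pvGoLeft_acc r k [r[k]], ih (le_of_lt hklt)]; simp
    · simp

lemma pvGoRight_acc (r : List Char) : ∀ (f : Nat) (x1 : Int) (s : List Char),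
    pvGoRight r f x1 s = s ++ pvGoRight r f x1 [] := by
  intro f
  induction f with
  | zero => intro x1 s; simp [pvGoRight]
  | succ f ih =>
    intro x1 s
    simp only [pvGoRight]
    split
    · rw [ih (x1+1) (s ++ _), ih (x1+1) ([] ++ _)]; simp
    · simp

lemma pvGoRight_eq (r : List Char) : ∀ (f k : Nat),
    pvGoRight r f ((k : Nat) : Int) [] = ((r.drop k).take f).takeWhile pvDigA := by
  intro f
  induction f with
  | zero => intro k; simp [pvGoRight]
  | succ f ih =>
    intro k
    by_cases hk : k < r.length
    · have hdropk : r.drop k = r[k] :: r.drop (k+1) := by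
        rw [List.drop_eq_getElem_cons hk]
      have hget : (PySem.List.pyGet? r ((k : Nat) : Int)).getD '.' = r[k] := by
        simp [PySem.List.pyGet?_natCast, List.getElem?_eq_getElem hk]
      simp only [pvGoRight, hget, hdropk, List.take_succ_cons, List.takeWhile_cons,
        List.nil_append]
      split
      · rw [pvGoRight_acc r f _ [r[k]]]
        have : ((k : Nat) : Int) + 1 = (((k+1 : Nat)) : Int) := by push_cast; ring
        rw [this, ih (k+1)]
        simp
      · simp
    · have hdropk : r.drop k = [] := List.drop_eq_nil_of_le (by omega)
      have hnone : r[k]? = none := List.getElem?_eq_none (by omega)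
      have hget : (PySem.List.pyGet? r ((k : Nat) : Int)).getD '.' = '.' := by
        simp [PySem.List.pyGet?_natCast, hnone]
      have hdot : pvDigA '.' = false := by decide
      simp only [pvGoRight, hget, hdropk, hdot]
      simp

lemma pv_take_append (l m : List Char) (q : Nat) : (l ++ m).take (l.length + q) = l ++ m.take q := by
  rw [List.take_append, List.take_of_length_le (by omega), Nat.add_sub_cancel_left]

lemma pv_takeWhile_eq_take (p : Char → Bool) (l : List Char) :
    l.takeWhile p = l.take (l.takeWhile p).length :=
  List.prefix_iff_eq_take.mp (List.takeWhile_prefix p)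

lemma pv_length_dropWhile (p : Char → Bool) (l : List Char) :
    (l.dropWhile p).length = l.length - (l.takeWhile p).length := by
  have h := congrArg List.length (List.takeWhile_append_dropWhile (p := p) (l := l))
  rw [List.length_append] at h
  omega

-- the slice from x minus the left run's length to x plus dr IS left run ++ dr right chars
lemma pv_slice_core (r : List Char) (k dr : Nat) (hk : k ≤ r.length) :
    PySem.List.slice r
      (some ((k - (((r.take k).reverse).takeWhile PySem.Chars.isdigit).length : Nat) : Int))
      (some ((k + dr : Nat) : Int)) =
    (((r.take k).reverse).takeWhile PySem.Chars.isdigit).reverse ++ (r.drop k).take dr := by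
  set L := ((r.take k).reverse).takeWhile PySem.Chars.isdigit with hL
  set P := ((r.take k).reverse).dropWhile PySem.Chars.isdigit with hP
  have hLP : L ++ P = (r.take k).reverse := by
    rw [hL, hP]; exact List.takeWhile_append_dropWhile
  have hlen : L.length + P.length = k := by
    have h := congrArg List.length hLP
    simp at h
    omega
  rw [PySem.List.slice_natCast]
  have hsplit : P.reverse ++ (L.reverse ++ r.drop k) = r := by
    rw [← List.append_assoc, ← List.reverse_append, hLP, List.reverse_reverse]
    exact List.take_append_drop k r
  have hdrop : r.drop (k - L.length) = L.reverse ++ r.drop k := by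
    conv_lhs => rw [← hsplit]
    exact List.drop_left' (by simp; omega)
  rw [hdrop]
  have harith : k + dr - (k - L.length) = L.reverse.length + dr := by
    simp only [List.length_reverse]
    omega
  rw [harith, pv_take_append]

-- ===== VERDICT (by name: the statement is the Claim_ definition above) =====
theorem chonit_spec : Claim_equal_chonit := by
  intro x y lines _hdom hpre
  obtain ⟨_hy, hx, hxle, _hcl3, _hcl4⟩ := hpre
  simp only [Spec_chonit, chonit, chonit_alt]
  have hxk : x = (x.toNat : Int) := (Int.toNat_of_nonneg hx).symm
  have hkn : x.toNat ≤ ((PySem.List.pyGet? lines y).getD "").toList.length := by omega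
  set r := ((PySem.List.pyGet? lines y).getD "").toList with hr
  set w := ((PySem.List.pyGet? lines 0).getD "").toList.length with hw
  set k := x.toNat with hknat
  -- B's slices
  have hslice_to : PySem.List.slice r none (some x) = r.take k := by
    rw [hxk]; exact PySem.List.slice_to_natCast r k
  have hright : PySem.List.slice r (some x) (some (w : Int)) = (r.drop k).take (w - k) := by
    rw [hxk]; exact PySem.List.slice_natCast r k w
  -- B's start index = k minus the length of the trailing digit run of row[:x]
  have hstart : (pvRstripDig (PySem.List.slice r none (some x))).length =
      k - (((r.take k).reverse).takeWhile pvDigB).length := by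
    rw [hslice_to]
    simp [pvRstripDig, pv_length_dropWhile, Nat.min_eq_left hkn]
  -- B's stop index = k plus the length of the leading digit run of row[x:width]
  have hdrle : (((r.drop k).take (w - k)).takeWhile pvDigB).length ≤ ((r.drop k).take (w - k)).length :=
    (List.takeWhile_sublist _).length_le
  have hstop : x + ((PySem.List.slice r (some x) (some (w : Int))).length : Int) -
      ((pvLstripDig (PySem.List.slice r (some x) (some (w : Int)))).length : Int) =
      ((k + (((r.drop k).take (w - k)).takeWhile pvDigB).length : Nat) : Int) := by
    rw [hright]
    simp only [pvLstripDig, pv_length_dropWhile]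
    rw [Nat.cast_sub hdrle]
    push_cast
    omega
  rw [hstart, hstop]
  -- A's fuel for the right scan is w - k
  have hfuel : (((w : Nat) : Int) - x).toNat = w - k := by omega
  rw [hfuel, hxk]
  rw [pvGoLeft_eq _ _ hkn, pvGoRight_eq]
  rw [pvDigA_eq_isdigit, pvDigB_eq_isdigit]
  rw [pv_slice_core r k _ hkn]
  -- the right scan is a take of the row's tail
  have hR : (((r.drop k).take (w - k)).takeWhile PySem.Chars.isdigit) =
      (r.drop k).take (((r.drop k).take (w - k)).takeWhile PySem.Chars.isdigit).length := by
    conv_lhs => rw [pv_takeWhile_eq_take PySem.Chars.isdigit ((r.drop k).take (w - k))]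
    rw [List.take_take]
    congr 1
    have := (List.takeWhile_sublist (l := (r.drop k).take (w - k)) (p := PySem.Chars.isdigit)).length_le
    simp at this ⊢
    omega
  rw [← hR]
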